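-- pv_equiv track=rewrite | github.com/geobtaa/harvester-api | harvesters/oai_qdc.py | oai_format
-- ===== SOURCE A (Python) =====
-- def oai_format(format_values, identifiers):
--     extension_map = {
--         ".tif": "TIFF",
--         ".tiff": "TIFF",
--         ".jpg": "JPEG",
--         ".jpeg": "JPEG",
--         ".jp2": "JPEG2000",
--         ".png": "PNG",
--         ".pdf": "PDF",
--         ".geojson": "GeoJSON",
--         ".json": "GeoJSON",
--         ".zip": "Files",
--     }
--
--     format_text = " ".join(format_values).lower()
--     for extension, mapped_format in extension_map.items():
--         for identifier in identifiers:
--             if identifier.lower().endswith(extension):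
--                 return mapped_format
--
--     if "paper map" in format_text:
--         return "TIFF"
--     if "pdf" in format_text:
--         return "PDF"
--     if "jpeg" in format_text:
--         return "JPEG"
--     if "tiff" in format_text or "tif" in format_text:
--         return "TIFF"
--     return ""
-- ===== SOURCE B (Python) =====
-- _EXTS = [".tif", ".tiff", ".jpg", ".jpeg", ".jp2", ".png",
--          ".pdf", ".geojson", ".json", ".zip"]
-- _FMTS = ["TIFF", "TIFF", "JPEG", "JPEG", "JPEG2000", "PNG",
--          "PDF", "GeoJSON", "GeoJSON", "Files"]
--
--
-- def _first_rank(low):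
--     """Rank (position in _EXTS) of the first extension `low` ends with;
--     len(_EXTS) if none matches."""
--     for rank, ext in enumerate(_EXTS):
--         if low.endswith(ext):
--             return rank
--     return len(_EXTS)
--
--
-- def oai_format(format_values, identifiers):
--     # One pass over the identifiers, keeping the minimal extension rank.
--     best = len(_EXTS)
--     for identifier in identifiers:
--         best = min(best, _first_rank(identifier.lower()))
--     if best < len(_EXTS):
--         return _FMTS[best]
--
--     format_text = " ".join(format_values).lower()
--     if "paper map" in format_text:
--         return "TIFF"
--     if "pdf" in format_text:
--         return "PDF"
--     if "jpeg" in format_text: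
--         return "JPEG"
--     if "tiff" in format_text or "tif" in format_text:
--         return "TIFF"
--     return ""
-- ===== Notes on version B (the rewrite author's own statement) =====
-- stated objective: alternative
-- what changed: Replaced A's extension-outer/identifier-inner nested scan with early return by a single pass over the identifiers that keeps the minimal extension rank (sentinel = number of extensions) and indexes the format table once at the end; the fallback substring checks on format_text are unchanged.
import Mathlib
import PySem

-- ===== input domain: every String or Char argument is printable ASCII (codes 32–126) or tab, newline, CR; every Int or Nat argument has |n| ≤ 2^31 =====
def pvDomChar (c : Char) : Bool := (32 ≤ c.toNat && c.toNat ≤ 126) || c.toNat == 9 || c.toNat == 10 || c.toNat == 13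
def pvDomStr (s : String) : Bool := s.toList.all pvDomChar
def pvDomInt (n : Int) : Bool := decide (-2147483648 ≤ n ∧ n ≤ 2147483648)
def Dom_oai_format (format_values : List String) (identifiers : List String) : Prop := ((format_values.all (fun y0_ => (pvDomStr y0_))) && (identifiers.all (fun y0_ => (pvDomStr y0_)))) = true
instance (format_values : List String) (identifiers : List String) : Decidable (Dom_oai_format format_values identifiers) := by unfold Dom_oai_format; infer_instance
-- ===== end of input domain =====

-- B replaces A's extension-outer/identifier-inner nested scan (return on first hit) by a
-- single pass over the identifiers keeping the minimal extension rank; same cost, alternative shape.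

-- ===== PORT A =====
-- extension_map as an ordered association list (dict literal, insertion order)
def pvExtMap : List (String × String) :=
  [(".tif", "TIFF"), (".tiff", "TIFF"), (".jpg", "JPEG"), (".jpeg", "JPEG"),
   (".jp2", "JPEG2000"), (".png", "PNG"), (".pdf", "PDF"), (".geojson", "GeoJSON"),
   (".json", "GeoJSON"), (".zip", "Files")]

-- the identical trailing substring checks on format_text (verbatim in both Pythons)
def pvFallback (format_values : List String) : String :=
  let format_text := PySem.Str.lower (PySem.Str.join " " format_values)
  if PySem.Str.isIn "paper map" format_text then "TIFF"
  else if PySem.Str.isIn "pdf" format_text then "PDF"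
  else if PySem.Str.isIn "jpeg" format_text then "JPEG"
  else if PySem.Str.isIn "tiff" format_text || PySem.Str.isIn "tif" format_text then "TIFF"
  else ""

-- inner loop: 'for identifier in identifiers: if identifier.lower().endswith(extension): return'
def pvInnerLoop (ext : String) : List String → Bool
  | [] => false
  | id :: rest =>
      if PySem.Str.endswith (PySem.Str.lower id) ext then true else pvInnerLoop ext rest

-- outer loop over extension_map.items()
def pvOuterLoop (identifiers : List String) : List (String × String) → Option String
  | [] => none
  | (ext, fmt) :: rest =>
      if pvInnerLoop ext identifiers then some fmt else pvOuterLoop identifiers rest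

def oai_format (format_values : List String) (identifiers : List String) : String :=
  match pvOuterLoop identifiers pvExtMap with
  | some fmt => fmt
  | none => pvFallback format_values

-- ===== PORT B =====
def pvExts : List String :=
  [".tif", ".tiff", ".jpg", ".jpeg", ".jp2", ".png", ".pdf", ".geojson", ".json", ".zip"]
def pvFmts : List String :=
  ["TIFF", "TIFF", "JPEG", "JPEG", "JPEG2000", "PNG", "PDF", "GeoJSON", "GeoJSON", "Files"]

-- _first_rank: position of the first extension `low` ends with, length of the list if none
def pvFirstRank (low : String) : List String → Nat
  | [] => 0
  | e :: rest => if PySem.Str.endswith low e then 0 else pvFirstRank low rest + 1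

def oai_format_alt (format_values : List String) (identifiers : List String) : String :=
  let best := identifiers.foldl
      (fun b id => min b (pvFirstRank (PySem.Str.lower id) pvExts)) pvExts.length
  if best < pvExts.length then pvFmts.getD best ""
  else pvFallback format_values

-- ===== PRECONDITION & SPEC =====
def Spec_oai_format (format_values : List String) (identifiers : List String) (out : String) : Prop := out = oai_format_alt format_values identifiers
instance (format_values : List String) (identifiers : List String) (out : String) : Decidable (Spec_oai_format format_values identifiers out) := by unfold Spec_oai_format; infer_instance

-- ===== CLAIM (what is proved, stated in full; the proofs are below) =====
def Claim_equal_oai_format : Prop := ∀ (format_values : List String) (identifiers : List String), Dom_oai_format format_values identifiers → Spec_oai_format format_values identifiers (oai_format format_values identifiers)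

-- ===== LEMMAS AND PROOFS =====

lemma pvInnerLoop_eq_any (ext : String) (ids : List String) :
    pvInnerLoop ext ids = ids.any (fun id => PySem.Str.endswith (PySem.Str.lower id) ext) := by
  induction ids with
  | nil => rfl
  | cons id rest ih =>
      simp only [pvInnerLoop, List.any_cons, ih]
      by_cases h : PySem.Str.endswith (PySem.Str.lower id) ext = true <;> simp only [h, if_true, Bool.false_eq_true, if_false, Bool.true_or, Bool.false_or]

lemma pvFoldMin_zero (g : String → Nat) (l : List String) :
    l.foldl (fun b x => min b (g x)) 0 = 0 := by
  induction l with
  | nil => rfl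
  | cons x rest ih => simpa using ih

lemma pvFoldMin_eq_zero (g : String → Nat) (l : List String) (a : Nat)
    (x : String) (hx : x ∈ l) (hg : g x = 0) :
    l.foldl (fun b y => min b (g y)) a = 0 := by
  induction l generalizing a with
  | nil => cases hx
  | cons y rest ih =>
      rcases List.mem_cons.mp hx with rfl | hmem
      · simp only [List.foldl_cons, hg, Nat.min_zero]
        exact pvFoldMin_zero g rest
      · exact ih _ hmem
lemma pvFoldMin_succ (g : String → Nat) (l : List String) (a : Nat) :
    l.foldl (fun b x => min b (g x + 1)) (a + 1)
      = l.foldl (fun b x => min b (g x)) a + 1 := by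
  induction l generalizing a with
  | nil => rfl
  | cons x rest ih => simpa [Nat.succ_min_succ] using ih (min a (g x))

lemma pvFoldMin_congr (f g : String → Nat) (l : List String) (a : Nat)
    (h : ∀ x ∈ l, f x = g x) :
    l.foldl (fun b x => min b (f x)) a = l.foldl (fun b x => min b (g x)) a := by
  induction l generalizing a with
  | nil => rfl
  | cons x rest ih =>
      simp only [List.foldl_cons, h x (List.mem_cons_self ..)]
      exact ih _ (fun y hy => h y (List.mem_cons_of_mem _ hy))

-- the master lemma: A's nested early-return loop equals B's minimal-rank fold,
-- for an arbitrary list of (extension, format) pairs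
lemma pvMaster (pairs : List (String × String)) (ids : List String) (fb : String) :
    (match pvOuterLoop ids pairs with | some fmt => fmt | none => fb)
      = (let best := ids.foldl
            (fun b id => min b (pvFirstRank (PySem.Str.lower id) (pairs.map Prod.fst)))
            pairs.length;
         if best < pairs.length then (pairs.map Prod.snd).getD best "" else fb) := by
  induction pairs with
  | nil =>
      simp only [pvOuterLoop, List.map_nil, List.length_nil]
      rw [show (fun b id => min b (pvFirstRank (PySem.Str.lower id) ([] : List String)))
            = fun b id => min b ((fun _ => 0 : String → Nat) id) from rfl]
      rw [pvFoldMin_zero (fun _ => 0) ids]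
      simp
  | cons p rest ih =>
      obtain ⟨ext, fmt⟩ := p
      simp only [pvOuterLoop, List.map_cons, List.length_cons]
      by_cases h : pvInnerLoop ext ids = true
      · rw [if_pos h]
        rw [pvInnerLoop_eq_any] at h
        obtain ⟨id, hmem, hends⟩ := List.any_eq_true.mp h
        have h0 : pvFirstRank (PySem.Str.lower id) (ext :: rest.map Prod.fst) = 0 := by
          simp only [pvFirstRank, hends, if_true]
        rw [pvFoldMin_eq_zero _ ids _ id hmem h0]
        simp
      · rw [if_neg h]
        rw [pvInnerLoop_eq_any] at h
        have hall : ∀ id ∈ ids, PySem.Str.endswith (PySem.Str.lower id) ext = false := by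
          intro id hid
          by_contra hc
          exact h (List.any_eq_true.mpr ⟨id, hid, by simpa using hc⟩)
        have hcongr : ∀ id ∈ ids,
            pvFirstRank (PySem.Str.lower id) (ext :: rest.map Prod.fst)
              = pvFirstRank (PySem.Str.lower id) (rest.map Prod.fst) + 1 := by
          intro id hid
          simp only [pvFirstRank, hall id hid, Bool.false_eq_true, if_false]
        rw [pvFoldMin_congr _ _ ids _ hcongr, pvFoldMin_succ]
        simp only [Nat.add_lt_add_iff_right, List.getD_cons_succ]
        exact ih

-- ===== VERDICT (by name: the statement is the Claim_ definition above) =====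
theorem oai_format_spec : Claim_equal_oai_format := by
  intro format_values identifiers _
  show oai_format format_values identifiers = oai_format_alt format_values identifiers
  have h := pvMaster pvExtMap identifiers (pvFallback format_values)
  simpa only [show pvExtMap.map Prod.fst = pvExts from rfl,
    show pvExtMap.map Prod.snd = pvFmts from rfl,
    show pvExtMap.length = pvExts.length from rfl] using h
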